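-- pv_equiv track=rewrite | github.com/scottmm374/My_Advent_solutions | Advent/2022/Day11MonkeyintheMiddle/main.py | check_monkey_seven
-- ===== SOURCE A (Python) =====
-- def check_monkey_seven(arr_0, arr_1, arr_2, count):
--
--     temp_7 = arr_0
--     temp_3 = arr_1
--     temp_5 = arr_2
--     m_seven = count
--
--     while len(temp_7) > 0:
--         m_seven +=1
--         item = temp_7.pop(0)
--         new = item + 3
--         # rounded = math.floor(new / 3)
--         if new % 13 == 0:
--             temp_3.append(new)
--         else:
--             temp_5.append(new)
--     return(temp_7, temp_3, temp_5, m_seven)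
-- ===== SOURCE B (Python) =====
-- def check_monkey_seven(arr_0, arr_1, arr_2, count):
--     count += len(arr_0)
--     incremented = [x + 3 for x in arr_0]
--     matches = [n for n in incremented if n % 13 == 0]
--     others = [n for n in incremented if n % 13 != 0]
--     arr_1.extend(matches)
--     arr_2.extend(others)
--     arr_0.clear()
--     return (arr_0, arr_1, arr_2, count)
-- ===== Notes on version B (the rewrite author's own statement) =====
-- stated objective: faster
-- what changed: Replaces the destructive pop(0)-and-dispatch while loop with an up-front count update and a partition of the incremented values into two bulk extends followed by a clear, mutating the same list objects.
import Mathlib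
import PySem

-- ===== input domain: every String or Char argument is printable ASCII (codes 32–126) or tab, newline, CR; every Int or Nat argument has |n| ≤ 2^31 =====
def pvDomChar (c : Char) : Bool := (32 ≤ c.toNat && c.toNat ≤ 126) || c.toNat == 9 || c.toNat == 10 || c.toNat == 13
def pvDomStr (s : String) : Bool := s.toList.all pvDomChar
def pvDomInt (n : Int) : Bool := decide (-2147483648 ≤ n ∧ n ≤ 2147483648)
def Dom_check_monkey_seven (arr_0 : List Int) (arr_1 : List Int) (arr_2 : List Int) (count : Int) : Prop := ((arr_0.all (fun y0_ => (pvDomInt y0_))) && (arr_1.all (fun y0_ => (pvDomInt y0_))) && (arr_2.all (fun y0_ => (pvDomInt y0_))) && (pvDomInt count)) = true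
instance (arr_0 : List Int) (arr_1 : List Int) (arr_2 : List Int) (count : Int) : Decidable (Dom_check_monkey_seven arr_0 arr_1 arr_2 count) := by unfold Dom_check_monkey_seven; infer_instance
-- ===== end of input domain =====

-- B partitions the incremented values in bulk instead of popping the front one by one (O(n) vs A's O(n^2) pop(0) loop); both mutate the same caller lists in place, the proved equivalence is about the return value.
-- ===== PORT A =====
-- literal port of A: while loop popping the front of temp_7, dispatching on (item+3) % 13
def pvLoopA : List Int → List Int → List Int → Int → List Int × List Int × List Int × Int
  | [], t3, t5, m => ([], t3, t5, m)
  | item :: rest, t3, t5, m =>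
      let new := item + 3
      if PySem.Int.mod new 13 == 0 then
        pvLoopA rest (t3 ++ [new]) t5 (m + 1)
      else
        pvLoopA rest t3 (t5 ++ [new]) (m + 1)

def check_monkey_seven (arr_0 : List Int) (arr_1 : List Int) (arr_2 : List Int) (count : Int) : List Int × List Int × List Int × Int :=
  pvLoopA arr_0 arr_1 arr_2 count

-- ===== PORT B =====
def check_monkey_seven_alt (arr_0 : List Int) (arr_1 : List Int) (arr_2 : List Int) (count : Int) : List Int × List Int × List Int × Int :=
  let count' := count + arr_0.length
  let incremented := arr_0.map (fun x => x + 3)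
  let hits := incremented.filter (fun n => PySem.Int.mod n 13 == 0)
  let others := incremented.filter (fun n => PySem.Int.mod n 13 != 0)
  ([], arr_1 ++ hits, arr_2 ++ others, count')

-- ===== PRECONDITION & SPEC =====
def Spec_check_monkey_seven (arr_0 : List Int) (arr_1 : List Int) (arr_2 : List Int) (count : Int) (out : List Int × List Int × List Int × Int) : Prop := out = check_monkey_seven_alt arr_0 arr_1 arr_2 count
instance (arr_0 : List Int) (arr_1 : List Int) (arr_2 : List Int) (count : Int) (out : List Int × List Int × List Int × Int) : Decidable (Spec_check_monkey_seven arr_0 arr_1 arr_2 count out) := by unfold Spec_check_monkey_seven; infer_instance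

-- ===== CLAIM =====
def Claim_equal_check_monkey_seven : Prop := ∀ (arr_0 : List Int) (arr_1 : List Int) (arr_2 : List Int) (count : Int), Dom_check_monkey_seven arr_0 arr_1 arr_2 count → Spec_check_monkey_seven arr_0 arr_1 arr_2 count (check_monkey_seven arr_0 arr_1 arr_2 count)

-- ===== LEMMAS AND PROOFS =====
theorem pvLoopA_eq (arr_0 : List Int) : ∀ (t3 t5 : List Int) (m : Int),
    pvLoopA arr_0 t3 t5 m =
      ([], t3 ++ (arr_0.map (fun x => x + 3)).filter (fun n => PySem.Int.mod n 13 == 0),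
           t5 ++ (arr_0.map (fun x => x + 3)).filter (fun n => PySem.Int.mod n 13 != 0),
           m + arr_0.length) := by
  induction arr_0 with
  | nil => intro t3 t5 m; simp [pvLoopA]
  | cons x xs ih =>
      intro t3 t5 m
      simp only [pvLoopA, ih, List.map_cons, List.filter_cons, List.length_cons]
      simp
      split_ifs <;> simp <;> omega

-- ===== VERDICT =====
theorem check_monkey_seven_spec : Claim_equal_check_monkey_seven := by
  intro a0 a1 a2 c _
  unfold Spec_check_monkey_seven check_monkey_seven check_monkey_seven_alt
  exact pvLoopA_eq a0 a1 a2 c
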